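-- pv_equiv track=rewrite | github.com/ananthashayana7/thun.ai | src/thunai/hardware.py | _compute_effective_stack
-- ===== SOURCE A (Python) =====
-- from typing import Dict, List, Optional
--
-- def _compute_effective_stack(available: List[str]) -> tuple[list[str], list[str]]:
--     """
--     Derive the active + fallback stack for stress estimation in priority order.
--
--     Rules:
--       - Primary (ideal): OBD + biometrics + vision
--       - If OBD drops: fall back to biometrics + vision (NFR-R-02)
--       - If camera drops: fall back to OBD + biometrics (NFR-R-02)
--       - If only one input remains, use it but mark degraded.
--     """
--     # Preserve deterministic ordering for tests and logs
--     primary_order = ["obd", "biometrics", "camera"]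
--
--     if all(key in available for key in primary_order):
--         return ["obd", "biometrics", "vision"], ["obd+biometrics+vision"]
--
--     if "obd" not in available and all(key in available for key in ("biometrics", "camera")):
--         return ["biometrics", "vision"], ["biometrics+vision"]
--
--     if "camera" not in available and all(key in available for key in ("obd", "biometrics")):
--         return ["obd", "biometrics"], ["obd+biometrics"]
--
--     if available:
--         # Partial survival — keep the order stable
--         ordered = [key for key in primary_order if key in available]
--         label_map = {"obd": "obd", "biometrics": "biometrics", "camera": "vision"}
--         effective = [label_map[key] for key in ordered]
--         return effective, ["+".join(effective)]
--
--     return [], []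
-- ===== SOURCE B (Python) =====
-- def _compute_effective_stack(available):
--     # Simpler: one data-driven mapping pass replaces the four explicit priority branches.
--     if not available:
--         return [], []
--     mapping = [("obd", "obd"), ("biometrics", "biometrics"), ("camera", "vision")]
--     effective = [label for key, label in mapping if key in available]
--     return effective, ["+".join(effective)]
-- ===== Notes on version B (the rewrite author's own statement) =====
-- stated objective: simpler
-- what changed: Replaces A's four explicit priority branches (each re-scanning the list with membership tests) with one data-driven pass over a (sensor, label) table plus the empty-input guard.
import Mathlib
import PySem

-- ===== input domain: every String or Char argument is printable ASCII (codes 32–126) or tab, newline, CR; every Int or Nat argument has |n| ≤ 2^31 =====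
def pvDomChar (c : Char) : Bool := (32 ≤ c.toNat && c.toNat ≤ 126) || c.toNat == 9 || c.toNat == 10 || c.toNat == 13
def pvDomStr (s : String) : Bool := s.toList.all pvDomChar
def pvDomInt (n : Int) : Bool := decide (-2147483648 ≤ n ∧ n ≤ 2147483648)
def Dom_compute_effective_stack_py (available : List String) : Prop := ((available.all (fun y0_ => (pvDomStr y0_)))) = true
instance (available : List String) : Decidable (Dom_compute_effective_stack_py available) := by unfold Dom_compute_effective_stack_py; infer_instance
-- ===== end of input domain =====

-- B replaces A's four explicit priority branches with one data-driven mapping pass (objective: simpler).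

-- ===== PORT A =====
def compute_effective_stack_py (available : List String) : List String × List String :=
  let primary_order : List String := ["obd", "biometrics", "camera"]
  if primary_order.all (fun key => available.contains key) then
    (["obd", "biometrics", "vision"], ["obd+biometrics+vision"])
  else if !available.contains "obd" && (["biometrics", "camera"].all (fun key => available.contains key)) then
    (["biometrics", "vision"], ["biometrics+vision"])
  else if !available.contains "camera" && (["obd", "biometrics"].all (fun key => available.contains key)) then
    (["obd", "biometrics"], ["obd+biometrics"])
  else if !available.isEmpty then
    let ordered := primary_order.filter (fun key => available.contains key)
    let label_map : PySem.Dict String String :=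
      PySem.Dict.ofList [("obd", "obd"), ("biometrics", "biometrics"), ("camera", "vision")]
    -- label_map[key]: exact, since every key of `ordered` is a key of label_map (so Python never raises KeyError)
    let effective := ordered.map (fun key => PySem.Dict.getD label_map key "")
    (effective, [PySem.Str.join "+" effective])
  else
    ([], [])

-- ===== PORT B =====
def compute_effective_stack_py_alt (available : List String) : List String × List String :=
  if available.isEmpty then
    ([], [])
  else
    let mapping : List (String × String) := [("obd", "obd"), ("biometrics", "biometrics"), ("camera", "vision")]
    let effective := mapping.filterMap (fun kl => if available.contains kl.1 then some kl.2 else none)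
    (effective, [PySem.Str.join "+" effective])

-- ===== PRECONDITION & SPEC =====
def Spec_compute_effective_stack_py (available : List String) (out : List String × List String) : Prop := out = compute_effective_stack_py_alt available
instance (available : List String) (out : List String × List String) : Decidable (Spec_compute_effective_stack_py available out) := by unfold Spec_compute_effective_stack_py; infer_instance

-- ===== CLAIM (what is proved, stated in full; the proofs are below) =====
def Claim_equal_compute_effective_stack_py : Prop := ∀ (available : List String), Dom_compute_effective_stack_py available → Spec_compute_effective_stack_py available (compute_effective_stack_py available)

-- ===== LEMMAS AND PROOFS =====

-- ===== VERDICT (by name: the statement is the Claim_ definition above) =====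
theorem compute_effective_stack_py_spec : Claim_equal_compute_effective_stack_py := by
  intro available _
  unfold Spec_compute_effective_stack_py compute_effective_stack_py compute_effective_stack_py_alt
  by_cases he : available.isEmpty
  · have h : available = [] := List.isEmpty_iff.mp he
    subst h
    decide
  · by_cases h0 : "obd" ∈ available <;>
    by_cases h1 : "biometrics" ∈ available <;>
    by_cases h2 : "camera" ∈ available <;>
    simp [h0, h1, h2, he, PySem.Dict.getD, PySem.Dict.get?, PySem.Dict.ofList, PySem.Str.join] <;> decide
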